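-- pv_equiv track=rewrite | github.com/nthomsencph/applied-algos | week_4/week4_3.py | freivals_algo
-- ===== SOURCE A (Python) =====
-- def freivals_algo(A, B, C, x, n):
--
--     """ Evaluates (ABx == Cx) in single iteration w/
--     probability 1/2. Error probability decreases expontentially such that
--     prob(err) <= 2^(-z), where z is number of iterations.
--
--     Returns:
--         str: faulty (negative) or correct (positive)
--     """
--
--     ABx, Bx, Cx = [0] * n, [0] * n, [0] * n # base values
--
--     # populate Bx
--     for i in range(n):
--         for j in range(n):
--             Bx[i] += B[i][j] * x[j]
--
--     # populate ABx
--     for i in range(n):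
--         for j in range(n):
--             ABx[i] += A[i][j] * Bx[j]
--
--     # populate Cx
--     for i in range(n):
--         for j in range(n):
--             Cx[i] += C[i][j] * x[j]
--
--     # check if ABx == Cx
--     for i in range(n):
--         if ABx[i] - Cx[i] != 0:
--             return "faulty"
--
--     return "correct"
-- ===== SOURCE B (Python) =====
-- def freivals_algo(A, B, C, x, n):
--     # Materialize the full product AB (O(n^3)), then compare AB*x with C*x componentwise.
--     AB = [[sum(A[i][j] * B[j][k] for j in range(n)) for k in range(n)]
--           for i in range(n)]
--     ABx = [sum(AB[i][k] * x[k] for k in range(n)) for i in range(n)]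
--     Cx = [sum(C[i][k] * x[k] for k in range(n)) for i in range(n)]
--     for i in range(n):
--         if ABx[i] != Cx[i]:
--             return "faulty"
--     return "correct"
-- ===== Notes on version B (the rewrite author's own statement) =====
-- stated objective: alternative
-- what changed: A avoids forming A*B by reassociating to two matrix-vector products (Bx then A*(Bx)); B instead materializes the full n-by-n product AB with a triple-nested comprehension, then computes AB*x and C*x as plain matrix-vector products and compares componentwise.
import Mathlib
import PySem

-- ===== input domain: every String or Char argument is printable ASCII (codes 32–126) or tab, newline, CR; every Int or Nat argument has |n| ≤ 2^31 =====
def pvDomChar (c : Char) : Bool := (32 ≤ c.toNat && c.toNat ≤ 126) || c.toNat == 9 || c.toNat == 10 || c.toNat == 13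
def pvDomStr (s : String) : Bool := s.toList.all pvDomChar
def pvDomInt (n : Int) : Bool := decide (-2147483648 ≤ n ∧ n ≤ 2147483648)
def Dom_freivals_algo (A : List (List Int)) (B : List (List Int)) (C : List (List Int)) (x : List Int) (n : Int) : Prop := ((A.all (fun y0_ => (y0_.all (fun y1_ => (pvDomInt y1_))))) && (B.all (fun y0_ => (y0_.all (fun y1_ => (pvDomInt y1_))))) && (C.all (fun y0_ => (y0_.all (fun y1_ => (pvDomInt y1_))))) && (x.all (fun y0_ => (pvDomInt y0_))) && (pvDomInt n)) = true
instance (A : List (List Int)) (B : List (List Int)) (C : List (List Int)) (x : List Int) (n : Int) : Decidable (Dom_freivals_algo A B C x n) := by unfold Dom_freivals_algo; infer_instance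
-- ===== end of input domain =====

-- B materializes the full matrix product AB (triple loop) and compares AB·x with C·x,
-- instead of A's reassociated matrix-vector products; objective: alternative (not faster).

-- ===== PORT A =====
-- xs[i] (index always in range under Pre_)
def pvGetI (xs : List Int) (i : Int) : Int := PySem.List.pyGetD xs i 0
-- m[i]: row access (in range under Pre_)
def pvRow (m : List (List Int)) (i : Int) : List Int := PySem.List.pyGetD m i []
-- A's final loop: early return "faulty" on the first i with ABx[i] - Cx[i] != 0
def pvCheck (ABx Cx : List Int) : List Int → String
  | [] => "correct"
  | i :: rest => if pvGetI ABx i - pvGetI Cx i ≠ 0 then "faulty" else pvCheck ABx Cx rest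

def freivals_algo (A : List (List Int)) (B : List (List Int)) (C : List (List Int)) (x : List Int) (n : Int) : String :=
  -- Bx: 'for i: for j: Bx[i] += B[i][j] * x[j]'
  let Bx := (PySem.List.pyRange 0 n 1).foldl (fun acc i => (PySem.List.pyRange 0 n 1).foldl
    (fun acc2 j => PySem.List.pySetD acc2 i (pvGetI acc2 i + pvGetI (pvRow B i) j * pvGetI x j)) acc)
    (List.replicate n.toNat 0)
  -- ABx: 'for i: for j: ABx[i] += A[i][j] * Bx[j]'
  let ABx := (PySem.List.pyRange 0 n 1).foldl (fun acc i => (PySem.List.pyRange 0 n 1).foldl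
    (fun acc2 j => PySem.List.pySetD acc2 i (pvGetI acc2 i + pvGetI (pvRow A i) j * pvGetI Bx j)) acc)
    (List.replicate n.toNat 0)
  -- Cx: 'for i: for j: Cx[i] += C[i][j] * x[j]'
  let Cx := (PySem.List.pyRange 0 n 1).foldl (fun acc i => (PySem.List.pyRange 0 n 1).foldl
    (fun acc2 j => PySem.List.pySetD acc2 i (pvGetI acc2 i + pvGetI (pvRow C i) j * pvGetI x j)) acc)
    (List.replicate n.toNat 0)
  pvCheck ABx Cx (PySem.List.pyRange 0 n 1)

-- ===== PORT B =====
def freivals_algo_alt (A : List (List Int)) (B : List (List Int)) (C : List (List Int)) (x : List Int) (n : Int) : String :=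
  -- AB: the materialized product, AB[i][k] = sum_j A[i][j]*B[j][k]
  let AB := (PySem.List.pyRange 0 n 1).map (fun i => (PySem.List.pyRange 0 n 1).map (fun k =>
    ((PySem.List.pyRange 0 n 1).map (fun j => pvGetI (pvRow A i) j * pvGetI (pvRow B j) k)).sum))
  -- ABx and Cx: plain matrix-vector products
  let ABx := (PySem.List.pyRange 0 n 1).map (fun i =>
    ((PySem.List.pyRange 0 n 1).map (fun k => pvGetI (pvRow AB i) k * pvGetI x k)).sum)
  let Cx := (PySem.List.pyRange 0 n 1).map (fun i =>
    ((PySem.List.pyRange 0 n 1).map (fun k => pvGetI (pvRow C i) k * pvGetI x k)).sum)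
  if (PySem.List.pyRange 0 n 1).any (fun i => pvGetI ABx i != pvGetI Cx i) then "faulty" else "correct"

-- ===== PRECONDITION & SPEC =====
-- Pre_ excludes exactly the inputs on which Python A raises IndexError: a positive n
-- exceeding the number of rows of A, B or C, the length of x, or the length of one of
-- the first n rows. (For n ≤ 0 all conditions hold trivially and A returns "correct".)
def Pre_freivals_algo (A : List (List Int)) (B : List (List Int)) (C : List (List Int)) (x : List Int) (n : Int) : Prop :=
  n ≤ (A.length : Int) ∧ n ≤ (B.length : Int) ∧ n ≤ (C.length : Int) ∧ n ≤ (x.length : Int) ∧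
  (∀ row ∈ A.take n.toNat, n ≤ (row.length : Int)) ∧
  (∀ row ∈ B.take n.toNat, n ≤ (row.length : Int)) ∧
  (∀ row ∈ C.take n.toNat, n ≤ (row.length : Int))
instance (A : List (List Int)) (B : List (List Int)) (C : List (List Int)) (x : List Int) (n : Int) : Decidable (Pre_freivals_algo A B C x n) := by unfold Pre_freivals_algo; infer_instance
def pvWitness_freivals_algo : List (List Int) × List (List Int) × List (List Int) × List Int × Int :=
  ([[2]], [[3]], [[6]], [5], 1)

def Spec_freivals_algo (A : List (List Int)) (B : List (List Int)) (C : List (List Int)) (x : List Int) (n : Int) (out : String) : Prop := out = freivals_algo_alt A B C x n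
instance (A : List (List Int)) (B : List (List Int)) (C : List (List Int)) (x : List Int) (n : Int) (out : String) : Decidable (Spec_freivals_algo A B C x n out) := by unfold Spec_freivals_algo; infer_instance

-- ===== CLAIM (what is proved, stated in full; the proofs are below) =====
def Claim_equal_freivals_algo : Prop := ∀ (A : List (List Int)) (B : List (List Int)) (C : List (List Int)) (x : List Int) (n : Int), Dom_freivals_algo A B C x n → Pre_freivals_algo A B C x n → Spec_freivals_algo A B C x n (freivals_algo A B C x n)

-- ===== LEMMAS AND PROOFS =====

-- sum over Python's range(n)
def sL (n : Int) (f : Int → Int) : Int := ((PySem.List.pyRange 0 n 1).map f).sum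

-- reading a cell of pySetD back, nonneg indices
theorem pv_get_set (acc : List Int) (i k : Int) (v : Int) (hi0 : 0 ≤ i)
    (hil : i.toNat < acc.length) (hk0 : 0 ≤ k) :
    pvGetI (PySem.List.pySetD acc i v) k = if k = i then v else pvGetI acc k := by
  have hi' : ((i.toNat : Nat) : Int) = i := Int.toNat_of_nonneg hi0
  have hk' : ((k.toNat : Nat) : Int) = k := Int.toNat_of_nonneg hk0
  rw [pvGetI, pvGetI, ← hi', ← hk', PySem.List.pyGetD_pySetD_natCast _ _ _ _ _ hil]
  by_cases h : k.toNat = i.toNat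
  · simp [h]
  · have h2 : ((k.toNat : Int)) ≠ ((i.toNat : Int)) := by omega
    rw [if_neg h, if_neg h2]

-- the inner Python loop 'for j: acc[i] += g(j)' collapses to one in-place update
theorem pv_inner_fold (i : Int) (g : Int → Int) (l : List Int) :
    ∀ (acc : List Int), 0 ≤ i → i.toNat < acc.length →
    l.foldl (fun a j => PySem.List.pySetD a i (pvGetI a i + g j)) acc
      = PySem.List.pySetD acc i (pvGetI acc i + (l.map g).sum) := by
  induction l with
  | nil =>
    intro acc h0 hl
    simp only [List.foldl_nil, List.map_nil, List.sum_nil, add_zero]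
    rw [PySem.List.pySetD_of_nonneg _ _ h0, pvGetI,
        PySem.List.pyGetD_eq_getElem _ _ h0 (by omega)]
    exact (List.set_getElem_self ..).symm
  | cons j l ih =>
    intro acc h0 hl
    simp only [List.foldl_cons, List.map_cons, List.sum_cons]
    rw [ih _ h0 (by rw [PySem.List.length_pySetD]; exact hl)]
    rw [pv_get_set acc i i _ h0 hl h0, if_pos rfl]
    rw [PySem.List.pySetD_of_nonneg _ _ h0, PySem.List.pySetD_of_nonneg _ _ h0,
        PySem.List.pySetD_of_nonneg _ _ h0, List.set_set]
    congr 1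
    ring

-- the outer loop over distinct in-range indices fills each cell with its row sum
theorem pv_nested_fold (n : Int) (T : Int → Int → Int) (l : List Int) :
    ∀ (acc : List Int), l.Nodup → (∀ i ∈ l, 0 ≤ i ∧ i.toNat < acc.length) →
    ∀ k : Int, 0 ≤ k → k.toNat < acc.length →
    pvGetI (l.foldl (fun a i => (PySem.List.pyRange 0 n 1).foldl
        (fun a2 j => PySem.List.pySetD a2 i (pvGetI a2 i + T i j)) a) acc) k
      = pvGetI acc k + (if k ∈ l then sL n (T k) else 0) := by
  induction l with
  | nil => intro acc _ _ k h0 hk; simp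
  | cons i l ih =>
    intro acc hnd hmem k h0 hk
    obtain ⟨hi0, hil⟩ := hmem i (by simp)
    simp only [List.foldl_cons]
    rw [pv_inner_fold i (T i) _ acc hi0 hil]
    have hlen : (PySem.List.pySetD acc i (pvGetI acc i + ((PySem.List.pyRange 0 n 1).map (T i)).sum)).length = acc.length :=
      PySem.List.length_pySetD ..
    rw [ih _ hnd.of_cons
      (fun i' hi' => ⟨(hmem i' (by simp [hi'])).1, by rw [hlen]; exact (hmem i' (by simp [hi'])).2⟩)
      k h0 (by rw [hlen]; exact hk)]
    rw [pv_get_set acc i k _ hi0 hil h0]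
    by_cases hki : k = i
    · subst hki
      have hnl : k ∉ l := (List.nodup_cons.mp hnd).1
      simp [hnl, sL]
    · simp [hki, List.mem_cons]

-- a full matrix-vector loop of port A, read back at an in-range cell
theorem pv_fold_mv (n : Int) (T : Int → Int → Int) (k : Int) (h0 : 0 ≤ k) (hk : k < n) :
    pvGetI ((PySem.List.pyRange 0 n 1).foldl (fun a i => (PySem.List.pyRange 0 n 1).foldl
        (fun a2 j => PySem.List.pySetD a2 i (pvGetI a2 i + T i j)) a) (List.replicate n.toNat 0)) k
      = sL n (T k) := by
  have hk' : k.toNat < n.toNat := by omega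
  rw [pv_nested_fold n T _ _ (PySem.List.nodup_pyRange_one 0 n)
      (fun i hi => by
        have := (PySem.List.mem_pyRange_one).mp hi
        exact ⟨by omega, by simp only [List.length_replicate]; omega⟩)
      k h0 (by simpa using hk')]
  have hmem : k ∈ PySem.List.pyRange 0 n 1 := (PySem.List.mem_pyRange_one).mpr ⟨h0, hk⟩
  have hrep : pvGetI (List.replicate n.toNat (0:Int)) k = 0 := by
    rw [pvGetI, PySem.List.pyGetD_eq_getElem _ _ h0 (by simp only [List.length_replicate]; omega)]
    simp
  rw [hrep, if_pos hmem, zero_add]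

-- index into a list built as a range comprehension
theorem pv_get_map (f : Int → Int) (n i : Int) (h0 : 0 ≤ i) (hi : i < n) :
    pvGetI ((PySem.List.pyRange 0 n 1).map f) i = f i := by
  rw [pvGetI, PySem.List.pyGetD_map_pyRange_of_nonneg f n i 0 h0 hi]

theorem pv_row_map (f : Int → List Int) (n i : Int) (h0 : 0 ≤ i) (hi : i < n) :
    pvRow ((PySem.List.pyRange 0 n 1).map f) i = f i := by
  rw [pvRow, PySem.List.pyGetD_map_pyRange_of_nonneg f n i [] h0 hi]

-- Bool 'any' only looks at members
theorem pv_any_congr {α : Type} (l : List α) (p q : α → Bool) (h : ∀ a ∈ l, p a = q a) :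
    l.any p = l.any q := by
  induction l with
  | nil => rfl
  | cons a l ih =>
    simp only [List.any_cons, h a (by simp), ih (fun b hb => h b (by simp [hb]))]

-- double list-sum exchange
theorem pv_sum_swap (l l' : List Int) (g : Int → Int → Int) :
    (l.map (fun i => (l'.map (fun j => g i j)).sum)).sum
      = (l'.map (fun j => (l.map (fun i => g i j)).sum)).sum := by
  induction l with
  | nil => simp
  | cons i l ih =>
    simp only [List.map_cons, List.sum_cons, ih, PySem.List.sum_map_add_int]

-- the reassociation Freivalds relies on: a·(B·x) = (a·B)·x, summed over range(n)
theorem pv_reassoc (n : Int) (ai : Int → Int) (b : Int → Int → Int) (xv : Int → Int) :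
    sL n (fun j => ai j * sL n (fun k => b j k * xv k))
      = sL n (fun k => sL n (fun j => ai j * b j k) * xv k) := by
  unfold sL
  have h1 : ((PySem.List.pyRange 0 n 1).map (fun j => ai j * ((PySem.List.pyRange 0 n 1).map (fun k => b j k * xv k)).sum)).sum
      = ((PySem.List.pyRange 0 n 1).map (fun j => ((PySem.List.pyRange 0 n 1).map (fun k => ai j * b j k * xv k)).sum)).sum := by
    apply congrArg
    apply List.map_congr_left
    intro j _
    rw [← List.sum_map_mul_left]
    exact congrArg _ (List.map_congr_left (fun k _ => by ring))
  rw [h1, pv_sum_swap]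
  apply congrArg
  apply List.map_congr_left
  intro k _
  rw [← List.sum_map_mul_right]

theorem pv_if_congr (b c : Bool) (h : b = c) :
    (if b = true then "faulty" else "correct") = (if c = true then "faulty" else "correct") := by
  rw [h]

theorem pv_check_eq (ABx Cx : List Int) (l : List Int) :
    pvCheck ABx Cx l = if l.any (fun i => decide (pvGetI ABx i - pvGetI Cx i ≠ 0)) then "faulty" else "correct" := by
  induction l with
  | nil => simp [pvCheck]
  | cons i l ih =>
    simp only [pvCheck, List.any_cons]
    by_cases h : pvGetI ABx i - pvGetI Cx i ≠ 0
    · simp [h]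
    · simp [h, ih]

-- A-side: replace the Bx entries inside a sum over range(n)
theorem pv_sum_getI (n : Int) (f : Int → Int) (bx : List Int) (g : Int → Int)
    (h : ∀ j, 0 ≤ j → j < n → pvGetI bx j = g j) :
    sL n (fun j => f j * pvGetI bx j) = sL n (fun j => f j * g j) := by
  unfold sL
  apply congrArg
  apply List.map_congr_left
  intro j hj
  have := (PySem.List.mem_pyRange_one).mp hj
  rw [h j (by omega) this.2]

-- B-side: indexing a comprehension inside a sum over range(n)
theorem pv_sum_get_map (n : Int) (g : Int → Int) (xv : List Int) :
    ((PySem.List.pyRange 0 n 1).map (fun k => pvGetI ((PySem.List.pyRange 0 n 1).map g) k * pvGetI xv k)).sum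
      = ((PySem.List.pyRange 0 n 1).map (fun k => g k * pvGetI xv k)).sum := by
  apply congrArg
  apply List.map_congr_left
  intro k hk
  have := (PySem.List.mem_pyRange_one).mp hk
  rw [pv_get_map g n k (by omega) this.2]

-- ===== VERDICT (by name: the statement is the Claim_ definition above) =====
theorem freivals_algo_spec : Claim_equal_freivals_algo := by
  intro A B C x n _ _
  unfold Spec_freivals_algo freivals_algo freivals_algo_alt
  dsimp only
  rw [pv_check_eq]
  apply pv_if_congr
  apply pv_any_congr
  intro i hi
  have hin := (PySem.List.mem_pyRange_one).mp hi
  have h0 : (0:Int) ≤ i := by omega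
  have hiN : i < n := hin.2
  -- port A: both outer folds read back as sums (conditional rewrites, sides closed by h0/hiN)
  simp only [pv_fold_mv, pv_get_map, pv_row_map, h0, hiN]
  -- inside port A's ABx sum, each Bx entry is itself a sum
  rw [pv_sum_getI n (fun j => pvGetI (pvRow A i) j) _
      (fun j => sL n (fun k => pvGetI (pvRow B j) k * pvGetI x k))
      (fun j hj1 hj2 => pv_fold_mv n _ j hj1 hj2)]
  -- reassociate A's double sum into B's shape
  rw [pv_reassoc]
  -- inside port B's ABx sum, each AB entry is the materialized product entry
  rw [pv_sum_get_map n _ x]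
  simp only [sL]
  rw [Bool.eq_iff_iff]
  simp [sub_ne_zero]
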